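-- pv_equiv track=rewrite | github.com/DanielSeanBrown/coding-challenges | edabit/splitting-up-numbers.py | num_split
-- ===== SOURCE A (Python) =====
-- def num_split(num):
--
--     '''Takes an integer and returns a list of its decimal components'''
--
--     negative = False
--     split = []
--     counter = 0
--
--     # recognise negative values
--     if num < 0:
--         negative = True
--         num *= -1
--
--     # extract values
--     for digit in str(num)[::-1]:
--         split.insert(0, int(digit) * 10 ** counter)
--         counter += 1
--
--     # ammend signs if needed
--     if negative:
--         for digit in range(len(split)):
--             split[digit] *= -1
--
--     return(split)
-- ===== SOURCE B (Python) =====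
-- def num_split(num):
--
--     '''Takes an integer and returns a list of its decimal components'''
--
--     if num == 0:
--         return [0]
--     sign = -1 if num < 0 else 1
--     n = abs(num)
--     out = []
--     place = 1
--     while n:
--         out = [sign * (n % 10) * place] + out
--         n //= 10
--         place *= 10
--     return out
-- ===== Notes on version B (the rewrite author's own statement) =====
-- stated objective: idiomatic
-- what changed: B extracts digits arithmetically with a divmod loop (least-significant first, prepending with the sign applied inline) instead of A's string conversion, string reversal, insert-at-front fold with a power counter, and separate index-loop sign pass.
import Mathlib
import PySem

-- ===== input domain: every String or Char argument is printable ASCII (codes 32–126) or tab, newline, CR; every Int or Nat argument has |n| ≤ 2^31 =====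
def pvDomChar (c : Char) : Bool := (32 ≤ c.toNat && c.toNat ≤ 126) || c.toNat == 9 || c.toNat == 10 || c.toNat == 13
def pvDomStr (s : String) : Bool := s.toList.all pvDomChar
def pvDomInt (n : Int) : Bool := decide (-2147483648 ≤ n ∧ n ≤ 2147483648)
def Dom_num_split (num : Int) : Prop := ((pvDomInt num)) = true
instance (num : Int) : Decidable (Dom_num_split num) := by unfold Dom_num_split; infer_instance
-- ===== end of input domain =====

-- B replaces A's str/reverse/insert-at-front/sign-pass pipeline by a single arithmetic divmod loop
-- with the sign applied inline (objective: more idiomatic; not faster).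

-- ===== PORT A =====
-- int(digit): digit is one character of str(n) for n ≥ 0, always '0'..'9', so ValueError cannot occur
def pyIntDigit (c : Char) : Int := (PySem.Int.ofChars? [c]).getD 0

-- loop body of `for digit in str(num)[::-1]: split.insert(0, int(digit) * 10 ** counter); counter += 1`
-- (counter starts at 0 and only increments, so it is kept as a Nat; 10 ** counter is exact)
def aStep (st : List Int × Nat) (c : Char) : List Int × Nat :=
  (PySem.List.insert st.1 0 (pyIntDigit c * 10 ^ st.2), st.2 + 1)

def num_split (num : Int) : List Int :=
  let negative : Bool := decide (num < 0)
  let num' : Int := if num < 0 then num * (-1) else num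
  -- str(num)[::-1]: reverse of the character list (PySem.Str.slice?_none_none_neg_one)
  let st := ((PySem.Int.toChars num').reverse).foldl aStep ([], 0)
  if negative then
    -- for digit in range(len(split)): split[digit] *= -1
    (PySem.List.pyRange 0 (st.1.length : Int) 1).foldl
      (fun s i => PySem.List.pySetD s i (PySem.List.pyGetD s i 0 * (-1))) st.1
  else st.1

-- ===== PORT B =====
-- while n: out = [sign * (n % 10) * place] + out; n //= 10; place *= 10   (n kept as the Nat abs(num))
def altLoop (n : Nat) (place sign : Int) (out : List Int) : List Int :=
  if h : n = 0 then out
  else altLoop (n / 10) (place * 10) sign (sign * ((n % 10 : Nat) : Int) * place :: out)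
  termination_by n
  decreasing_by exact Nat.div_lt_self (Nat.pos_of_ne_zero h) (by omega)

def num_split_alt (num : Int) : List Int :=
  if num = 0 then [0]
  else altLoop num.natAbs 1 (if num < 0 then -1 else 1) []

-- ===== PRECONDITION & SPEC =====
def Spec_num_split (num : Int) (out : List Int) : Prop := out = num_split_alt num
instance (num : Int) (out : List Int) : Decidable (Spec_num_split num out) := by unfold Spec_num_split; infer_instance

-- ===== CLAIM (what is proved, stated in full; the proofs are below) =====
def Claim_equal_num_split : Prop := ∀ (num : Int), Dom_num_split num → Spec_num_split num (num_split num)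

-- ===== LEMMAS AND PROOFS =====

lemma pyIntDigit_digitChar (d : Nat) (h : d < 10) : pyIntDigit (Nat.digitChar d) = (d : Int) := by
  interval_cases d <;> decide

lemma insert_zero {α : Type} (xs : List α) (v : α) : PySem.List.insert xs 0 v = v :: xs := by
  simp [PySem.List.insert, PySem.List.sliceIndices]

-- A's digit-extraction fold equals B's divmod loop (both for the absolute value, sign 1).
lemma afold_main (n : Nat) (hn : 0 < n) : ∀ (out : List Int) (cnt : Nat),
    ((Nat.toDigits 10 n).reverse).foldl aStep (out, cnt)
      = (altLoop n (10 ^ cnt) 1 out, cnt + (Nat.toDigits 10 n).length) := by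
  induction n using Nat.strong_induction_on with
  | _ n ih =>
    intro out cnt
    by_cases h10 : n < 10
    · rw [Nat.toDigits_of_lt_base h10]
      rw [altLoop, dif_neg (by omega)]
      rw [altLoop, dif_pos (Nat.div_eq_of_lt h10)]
      simp [aStep, insert_zero, pyIntDigit_digitChar n h10, Nat.mod_eq_of_lt h10]
    · rw [Nat.toDigits_of_base_le (by omega) (by omega)]
      have hpos : 0 < n / 10 := Nat.div_pos (by omega) (by omega)
      have hlt : n / 10 < n := Nat.div_lt_self hn (by omega)
      rw [List.reverse_append, List.reverse_singleton, List.singleton_append, List.foldl_cons]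
      have hstep : aStep (out, cnt) (Nat.digitChar (n % 10))
          = (((n % 10 : Nat) : Int) * 10 ^ cnt :: out, cnt + 1) := by
        simp [aStep, insert_zero, pyIntDigit_digitChar (n % 10) (Nat.mod_lt n (by omega))]
      rw [hstep, ih (n / 10) hlt hpos (((n % 10 : Nat) : Int) * 10 ^ cnt :: out) (cnt + 1)]
      conv_rhs => rw [altLoop, dif_neg (show ¬ n = 0 by omega)]
      rw [pow_succ]
      simp only [one_mul, Prod.mk.injEq, List.length_append, List.length_singleton]
      exact ⟨trivial, by omega⟩

-- a sign of -1 in B's loop is the same as mapping (· * -1) over the sign-1 result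
lemma altLoop_neg (n : Nat) : ∀ (place : Int) (out : List Int),
    altLoop n place (-1) (out.map (fun x => x * (-1)))
      = (altLoop n place 1 out).map (fun x => x * (-1)) := by
  induction n using Nat.strong_induction_on with
  | _ n ih =>
    intro place out
    by_cases h : n = 0
    · subst h; rw [altLoop, dif_pos rfl]
      conv_rhs => rw [altLoop, dif_pos rfl]
    · rw [altLoop, dif_neg h]
      conv_rhs => rw [altLoop, dif_neg h]
      have : (-1 : Int) * ((n % 10 : Nat) : Int) * place
          = (1 * ((n % 10 : Nat) : Int) * place) * (-1) := by ring
      rw [this, show ((1 * ((n % 10 : Nat) : Int) * place) * (-1)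
            :: List.map (fun x => x * (-1)) out)
          = List.map (fun x => x * (-1)) (1 * ((n % 10 : Nat) : Int) * place :: out) from rfl]
      exact ih (n / 10) (Nat.div_lt_self (Nat.pos_of_ne_zero h) (by omega)) _ _

-- A's sign pass over index i in range(len(xs)) multiplies every element by -1
lemma setloop (n : Nat) (xs : List Int) :
    (List.range n).foldl (fun s i => s.set i (s.getD i 0 * (-1))) xs
      = (xs.take n).map (fun x => x * (-1)) ++ xs.drop n := by
  induction n with
  | zero => simp
  | succ n ih =>
    rw [List.range_succ, List.foldl_append, ih, List.foldl_cons, List.foldl_nil]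
    by_cases h : n < xs.length
    · have hlen : ((xs.take n).map (fun x => x * (-1))).length = n := by
        simp [Nat.min_eq_left (Nat.le_of_lt h)]
      have hdrop : xs.drop n = xs[n] :: xs.drop (n + 1) := List.drop_eq_getElem_cons h
      rw [hdrop]
      rw [List.getD_eq_getElem?_getD]
      rw [List.getElem?_append_right (by omega)]
      rw [List.set_append_right _ _ (by omega)]
      simp only [hlen, Nat.sub_self, List.getElem?_cons_zero, Option.getD_some, List.set_cons_zero]
      have htake : List.map (fun x => x * (-1)) (List.take (n + 1) xs)
          = List.map (fun x => x * (-1)) (List.take n xs) ++ [xs[n] * (-1)] := by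
        rw [List.take_add_one, List.getElem?_eq_getElem h]
        simp only [Option.toList_some, List.map_append, List.map_cons, List.map_nil]
      rw [htake]
      simp
    · have hle : xs.length ≤ n := by omega
      rw [List.take_of_length_le hle, List.take_of_length_le (by omega),
          List.drop_of_length_le hle, List.drop_of_length_le (by omega)]
      simp only [List.append_nil]
      rw [List.set_eq_of_length_le (by simp; omega)]

lemma signpass (xs : List Int) :
    (PySem.List.pyRange 0 (xs.length : Int) 1).foldl
      (fun s i => PySem.List.pySetD s i (PySem.List.pyGetD s i 0 * (-1))) xs
      = xs.map (fun x => x * (-1)) := by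
  rw [PySem.List.pyRange_zero_nat xs.length, List.foldl_map]
  simp only [PySem.List.pySetD_natCast, PySem.List.pyGetD_natCast]
  rw [setloop]
  simp

-- ===== VERDICT (by name: the statement is the Claim_ definition above) =====
theorem num_split_spec : Claim_equal_num_split := by
  intro num _
  unfold Spec_num_split
  by_cases h0 : num = 0
  · subst h0; decide
  · unfold num_split num_split_alt
    rw [if_neg h0]
    have habs : (if num < 0 then num * (-1) else num) = (num.natAbs : Int) := by
      split <;> omega
    have hchars : PySem.Int.toChars (if num < 0 then num * (-1) else num)
        = Nat.toDigits 10 num.natAbs := by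
      rw [habs]
      simp only [PySem.Int.toChars, if_neg (by omega : ¬ ((num.natAbs : Int) < 0)),
        Int.toNat_natCast]
    have hpos : 0 < num.natAbs := Int.natAbs_pos.mpr h0
    simp only [hchars]
    rw [show (([] : List Int), (0 : Nat)) = (([] : List Int), 0) from rfl]
    rw [afold_main num.natAbs hpos [] 0]
    simp only [pow_zero]
    by_cases hneg : num < 0
    · rw [if_pos (by simpa using hneg), if_pos hneg]
      rw [signpass]
      have := altLoop_neg num.natAbs 1 []
      simp only [List.map_nil] at this
      rw [← this]
    · rw [if_neg (by simpa using hneg), if_neg hneg]
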